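-- pv_equiv track=rewrite | github.com/Umang-Lodaya/LeetCode-Questions | Unique Number of Occurrences - GFG/unique-number-of-occurrences.py | isFrequencyUnique
-- ===== SOURCE A (Python) =====
-- from typing import List
--
-- def isFrequencyUnique(n : int, arr : List[int]) -> bool:
--     freq = dict()
--     uniq = set()
--     for i in arr:
--         freq[i] = freq.get(i, 0) + 1
--
--     for val in freq.values():
--         if val in uniq:
--             return False
--         uniq.add(val)
--
--     return True
-- ===== SOURCE B (Python) =====
-- def isFrequencyUnique(n, arr):
--     freq = {}
--     for x in arr:
--         freq[x] = freq.get(x, 0) + 1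
--     # sort the frequencies, then scan adjacent pairs for an equal neighbour
--     counts = sorted(freq.values())
--     return all(a != b for a, b in zip(counts, counts[1:]))
-- ===== Notes on version B (the rewrite author's own statement) =====
-- stated objective: alternative
-- what changed: Replaces A's auxiliary set with early-return membership test by sorting the frequency list and scanning adjacent pairs for an equal neighbour.
import Mathlib
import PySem

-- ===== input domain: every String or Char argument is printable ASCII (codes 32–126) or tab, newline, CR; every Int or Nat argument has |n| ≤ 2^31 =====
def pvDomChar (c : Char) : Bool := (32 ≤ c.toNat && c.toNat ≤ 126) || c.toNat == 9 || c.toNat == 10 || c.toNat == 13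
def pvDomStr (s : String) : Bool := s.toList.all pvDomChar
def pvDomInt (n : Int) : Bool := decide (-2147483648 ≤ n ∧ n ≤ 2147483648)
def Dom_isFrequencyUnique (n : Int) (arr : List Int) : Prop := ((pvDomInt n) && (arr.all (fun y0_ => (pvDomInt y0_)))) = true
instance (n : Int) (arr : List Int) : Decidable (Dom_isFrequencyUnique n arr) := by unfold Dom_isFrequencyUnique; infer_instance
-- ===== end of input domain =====

-- B sorts the list of distinct-element frequencies and scans adjacent pairs, instead of A's counting dict plus set-membership duplicate check; same value on every input.


-- ===== PORT A =====
-- the 'for val in freq.values(): if val in uniq: return False; uniq.add(val)' loop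
def pvCheckVals (vals : List Int) (uniq : PySem.Set Int) : Bool :=
  match vals with
  | [] => true
  | v :: rest => if PySem.Set.contains uniq v then false else pvCheckVals rest (PySem.Set.add uniq v)

def isFrequencyUnique (n : Int) (arr : List Int) : Bool :=
  let freq := arr.foldl (fun d i => d.insert i (d.getD i 0 + 1)) (PySem.Dict.empty : PySem.Dict Int Int)
  pvCheckVals freq.values PySem.Set.empty

-- ===== PORT B =====
-- all(a != b for a, b in zip(counts, counts[1:])) — adjacent-pair scan
def pvAdjDistinct : List Int → Bool
  | a :: b :: t => a != b && pvAdjDistinct (b :: t)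
  | _ => true

def isFrequencyUnique_alt (n : Int) (arr : List Int) : Bool :=
  let freq := arr.foldl (fun d x => d.insert x (d.getD x 0 + 1)) (PySem.Dict.empty : PySem.Dict Int Int)
  let counts := PySem.List.sorted freq.values (fun v => v) false
  pvAdjDistinct counts

-- ===== PRECONDITION & SPEC =====
def Spec_isFrequencyUnique (n : Int) (arr : List Int) (out : Bool) : Prop := out = isFrequencyUnique_alt n arr
instance (n : Int) (arr : List Int) (out : Bool) : Decidable (Spec_isFrequencyUnique n arr out) := by unfold Spec_isFrequencyUnique; infer_instance

-- ===== CLAIM (what is proved, stated in full; the proofs are below) =====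
def Claim_equal_isFrequencyUnique : Prop := ∀ (n : Int) (arr : List Int), Dom_isFrequencyUnique n arr → Spec_isFrequencyUnique n arr (isFrequencyUnique n arr)

-- ===== LEMMAS AND PROOFS =====

-- A's early-return loop decides: vals has no duplicates and none of it is already in uniq
theorem pvCheckVals_iff (vals : List Int) (uniq : PySem.Set Int) :
    pvCheckVals vals uniq = true ↔ vals.Nodup ∧ ∀ v ∈ vals, v ∉ uniq := by
  induction vals generalizing uniq with
  | nil => simp [pvCheckVals]
  | cons v rest ih =>
    simp only [pvCheckVals]
    cases hc : PySem.Set.contains uniq v with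
    | true =>
      have hv : v ∈ uniq := (PySem.Set.contains_iff uniq v).mp hc
      simp [hv]
    | false =>
      have hv : v ∉ uniq := by simpa using hc
      simp only [Bool.false_eq_true, if_false, ih]
      constructor
      · rintro ⟨hnd, hall⟩
        have hvr : v ∉ rest := fun hm =>
          hall v hm ((PySem.Set.mem_add uniq v v).mpr (Or.inr rfl))
        refine ⟨List.nodup_cons.mpr ⟨hvr, hnd⟩, ?_⟩
        intro w hw hm
        rcases List.mem_cons.mp hw with rfl | hw'
        · exact hv hm
        · exact hall w hw' ((PySem.Set.mem_add uniq v w).mpr (Or.inl hm))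
      · rintro ⟨hnd, hall⟩
        have h1 := List.nodup_cons.mp hnd
        refine ⟨h1.2, fun w hw hm => ?_⟩
        rcases (PySem.Set.mem_add uniq v w).mp hm with hm' | rfl
        · exact hall w (List.mem_cons_of_mem _ hw) hm'
        · exact h1.1 hw

-- B's adjacent scan on a ≤-sorted list decides Nodup
theorem pvAdjDistinct_iff (l : List Int) (hs : l.Pairwise (· ≤ ·)) :
    pvAdjDistinct l = true ↔ l.Nodup := by
  induction l with
  | nil => simp [pvAdjDistinct]
  | cons a t ih =>
    cases t with
    | nil => simp [pvAdjDistinct]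
    | cons b t' =>
      have hs' : (b :: t').Pairwise (· ≤ ·) := hs.tail
      have hab : a ≤ b := (List.pairwise_cons.mp hs).1 b (by simp)
      simp only [pvAdjDistinct, Bool.and_eq_true, bne_iff_ne, ne_eq, ih hs']
      constructor
      · rintro ⟨hne, hnd⟩
        refine List.nodup_cons.mpr ⟨?_, hnd⟩
        intro hmem0
        rcases List.mem_cons.mp hmem0 with hmem | hmem
        · exact hne hmem
        · -- a ∈ t', but a ≤ b ≤ every element of t' and a ≠ b; a ≤ x and x chain
          have hax : a < b := lt_of_le_of_ne hab hne
          have hbx : b ≤ a := (List.pairwise_cons.mp hs').1 a hmem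
          exact absurd (lt_of_lt_of_le hax hbx) (lt_irrefl a)
      · intro hnd
        have h1 := List.nodup_cons.mp hnd
        exact ⟨fun h => h1.1 (by simp [h]), h1.2⟩

-- ===== VERDICT (by name: the statement is the Claim_ definition above) =====
theorem isFrequencyUnique_spec : Claim_equal_isFrequencyUnique := by
  intro n arr _
  show isFrequencyUnique n arr = isFrequencyUnique_alt n arr
  show pvCheckVals (arr.foldl (fun d i => d.insert i (d.getD i 0 + 1)) (PySem.Dict.empty : PySem.Dict Int Int)).values PySem.Set.empty
      = pvAdjDistinct (PySem.List.sorted (arr.foldl (fun d x => d.insert x (d.getD x 0 + 1)) (PySem.Dict.empty : PySem.Dict Int Int)).values (fun v => v) false)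
  set vals := (arr.foldl (fun d x => d.insert x (d.getD x 0 + 1)) (PySem.Dict.empty : PySem.Dict Int Int)).values with hvals
  have hA : pvCheckVals vals PySem.Set.empty = true ↔ vals.Nodup := by
    rw [pvCheckVals_iff]
    simp [PySem.Set.empty]
  have hperm : (PySem.List.sorted vals (fun v => v) false).Perm vals :=
    PySem.List.sorted_perm vals (fun v => v) false
  have hB : pvAdjDistinct (PySem.List.sorted vals (fun v => v) false) = true ↔ vals.Nodup := by
    rw [pvAdjDistinct_iff _ (PySem.List.sorted_pairwise vals (fun v => v))]
    exact hperm.nodup_iff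
  by_cases h : vals.Nodup
  · rw [hA.mpr h, (hB.mpr h)]
  · have a1 : pvCheckVals vals PySem.Set.empty = false := by
      cases hx : pvCheckVals vals PySem.Set.empty
      · rfl
      · exact absurd (hA.mp hx) h
    have b1 : pvAdjDistinct (PySem.List.sorted vals (fun v => v) false) = false := by
      cases hx : pvAdjDistinct (PySem.List.sorted vals (fun v => v) false)
      · rfl
      · exact absurd (hB.mp hx) h
    rw [a1, b1]
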